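-- pv_equiv track=rewrite | github.com/InternetHealthReport/as-hegemony | hege/utils/utils.py | deduplicate_as_path
-- ===== SOURCE A (Python) =====
-- def deduplicate_as_path(aspath: list):
--     """Remove duplicate ASNs from the path and return the remaining path in order.
--
--     Primary purpose is to remove path prepending, but also handle cases of "invalid" AS
--     paths of the form A B A, which are rare but exist.
--     """
--
--     # Cut end of the path if origin AS appears multiple times
--     origin_as = aspath[-1]
--     if origin_as in aspath[:-1]:
--         first_idx = aspath.index(origin_as)
--         aspath = aspath[:first_idx+1]
--
--     # Remove deduplicated ASes
--     seen_asns = set()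
--     dedup_aspath = list()
--     for asn in aspath:
--         if asn in seen_asns:
--             continue
--         dedup_aspath.append(asn)
--         seen_asns.add(asn)
--     return dedup_aspath
-- ===== SOURCE B (Python) =====
-- def deduplicate_as_path(aspath: list):
--     """Single pass: dedup while scanning, stop as soon as the origin AS is emitted."""
--     origin_as = aspath[-1]
--     seen = set()
--     out = []
--     for asn in aspath:
--         if asn not in seen:
--             seen.add(asn)
--             out.append(asn)
--             if asn == origin_as:
--                 break
--     return out
-- ===== Notes on version B (the rewrite author's own statement) =====
-- stated objective: simpler
-- what changed: B replaces A's three phases (membership test on aspath[:-1], list.index plus slicing, then a dedup loop) by one dedup pass that breaks as soon as the origin AS is emitted, which is exactly where A's slice cuts.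
import Mathlib
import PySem

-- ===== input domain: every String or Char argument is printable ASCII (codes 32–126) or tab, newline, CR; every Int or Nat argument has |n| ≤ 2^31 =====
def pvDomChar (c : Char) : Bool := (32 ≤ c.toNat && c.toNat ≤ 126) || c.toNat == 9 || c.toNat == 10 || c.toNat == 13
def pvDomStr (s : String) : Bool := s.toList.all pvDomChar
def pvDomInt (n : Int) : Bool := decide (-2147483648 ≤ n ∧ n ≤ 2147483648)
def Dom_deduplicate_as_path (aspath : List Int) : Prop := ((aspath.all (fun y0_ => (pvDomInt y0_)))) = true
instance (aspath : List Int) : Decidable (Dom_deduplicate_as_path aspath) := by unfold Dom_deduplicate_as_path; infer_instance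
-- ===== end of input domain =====

-- B merges A's truncate-at-origin and dedup phases into one pass that stops when the
-- origin AS is emitted (objective: simpler). Both raise IndexError on [] (excluded by Pre_).

-- ===== PORT A =====
def deduplicate_as_path (aspath : List Int) : List Int :=
  match PySem.List.pyGet? aspath (-1) with
  | none => []   -- IndexError on []; excluded by Pre_
  | some origin_as =>
    let aspath' :=
      if origin_as ∈ PySem.List.slice aspath none (some (-1)) then
        match PySem.List.index? aspath origin_as with
        | none => aspath   -- unreachable: origin_as ∈ aspath
        | some first_idx => PySem.List.slice aspath none (some ((first_idx : Int) + 1))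
      else aspath
    (aspath'.foldl
      (fun (st : PySem.Set Int × List Int) asn =>
        if PySem.Set.contains st.1 asn then st
        else (PySem.Set.add st.1 asn, st.2 ++ [asn]))
      (PySem.Set.empty, [])).2

-- ===== PORT B =====
def dedupLoopB (origin : Int) (seen : PySem.Set Int) (out : List Int) : List Int → List Int
  | [] => out
  | asn :: rest =>
    if PySem.Set.contains seen asn then dedupLoopB origin seen out rest
    else if asn = origin then out ++ [asn]    -- break after appending the origin
    else dedupLoopB origin (PySem.Set.add seen asn) (out ++ [asn]) rest

def deduplicate_as_path_alt (aspath : List Int) : List Int :=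
  match PySem.List.pyGet? aspath (-1) with
  | none => []   -- IndexError on []; excluded by Pre_
  | some origin_as => dedupLoopB origin_as PySem.Set.empty [] aspath

-- ===== PRECONDITION & SPEC =====
-- A raises IndexError (aspath[-1]) on the empty list; that input alone is excluded.
def Pre_deduplicate_as_path (aspath : List Int) : Prop := aspath ≠ []
instance (aspath : List Int) : Decidable (Pre_deduplicate_as_path aspath) := by
  unfold Pre_deduplicate_as_path; infer_instance
def pvWitness_deduplicate_as_path : List Int := [1, 2, 2, 3]
def Spec_deduplicate_as_path (aspath : List Int) (out : List Int) : Prop := out = deduplicate_as_path_alt aspath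
instance (aspath : List Int) (out : List Int) : Decidable (Spec_deduplicate_as_path aspath out) := by unfold Spec_deduplicate_as_path; infer_instance

-- ===== CLAIM (what is proved, stated in full; the proofs are below) =====
def Claim_equal_deduplicate_as_path : Prop := ∀ (aspath : List Int), Dom_deduplicate_as_path aspath → Pre_deduplicate_as_path aspath → Spec_deduplicate_as_path aspath (deduplicate_as_path aspath)

-- ===== LEMMAS AND PROOFS =====

-- A's dedup fold, named for the proofs.
def aFold (seen : PySem.Set Int) (out : List Int) (l : List Int) : List Int :=
  (l.foldl
    (fun (st : PySem.Set Int × List Int) asn =>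
      if PySem.Set.contains st.1 asn then st
      else (PySem.Set.add st.1 asn, st.2 ++ [asn]))
    (seen, out)).2

theorem aFold_nil (seen : PySem.Set Int) (out : List Int) : aFold seen out [] = out := rfl

theorem aFold_cons (seen : PySem.Set Int) (out : List Int) (a : Int) (l : List Int) :
    aFold seen out (a :: l) =
      if PySem.Set.contains seen a then aFold seen out l
      else aFold (PySem.Set.add seen a) (out ++ [a]) l := by
  simp only [aFold, List.foldl_cons]
  split_ifs <;> rfl

-- core: B's loop on l equals A's fold on l truncated just after the first origin.
theorem index?_mem (l : List Int) (o : Int) (h : o ∈ l) :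
    PySem.List.index? l o = some (l.idxOf o) := by
  rw [PySem.List.index?_eq_idxOf?, List.idxOf?_eq_some_iff]
  have hlen := List.idxOf_lt_length_of_mem h
  refine ⟨hlen, List.getElem_idxOf _, fun j hj h' => ?_⟩
  have hmt : o ∈ l.take (j+1) := by
    have hg : (l.take (j+1))[j]'(by simp; omega) = o := by
      rw [List.getElem_take]; exact h'
    exact hg ▸ List.getElem_mem _
  have := (List.mem_take_iff_idxOf_lt h).mp hmt
  omega

theorem core (l : List Int) (o : Int) :
    ∀ (seen : PySem.Set Int) (out : List Int), o ∈ l → o ∉ seen →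
      dedupLoopB o seen out l = aFold seen out (l.take (l.idxOf o + 1)) := by
  induction l with
  | nil => intro _ _ h; exact absurd h (List.not_mem_nil)
  | cons a rest ih =>
    intro seen out hmem hns
    by_cases hao : a = o
    · subst hao
      have hc : PySem.Set.contains seen a = false := by
        simpa [PySem.Set.contains_iff] using hns
      simp [dedupLoopB, hns, List.idxOf_cons_self, aFold_cons, aFold_nil]
    · have ho : o ∈ rest := by
        rcases List.mem_cons.mp hmem with h | h
        · exact absurd h.symm hao
        · exact h
      have hidx : (a :: rest).idxOf o = rest.idxOf o + 1 := by
        simp [hao]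
      rw [hidx]
      simp only [List.take_succ_cons, aFold_cons]
      by_cases hseen : a ∈ seen
      · have hc : PySem.Set.contains seen a = true := by
          simpa [PySem.Set.contains_iff] using hseen
        simp only [dedupLoopB, hc, if_true]
        exact ih seen out ho hns
      · have hc : PySem.Set.contains seen a = false := by
          simpa [PySem.Set.contains_iff] using hseen
        simp only [dedupLoopB, hc, Bool.false_eq_true, if_false, if_neg hao]
        have hna : o ∉ PySem.Set.add seen a := by
          simp only [PySem.Set.mem_add, not_or]
          exact ⟨hns, fun h => hao h.symm⟩
        exact ih _ _ ho hna

-- A's truncated list is exactly l.take (idxOf o + 1) when o is the last element.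
theorem trunc_eq (l : List Int) (o : Int) (hl : l.getLast? = some o) :
    (if o ∈ PySem.List.slice l none (some (-1)) then
        match PySem.List.index? l o with
        | none => l
        | some first_idx => PySem.List.slice l none (some ((first_idx : Int) + 1))
      else l) = l.take (l.idxOf o + 1) := by
  have hmem : o ∈ l := List.mem_of_getLast? hl
  rw [PySem.List.slice_to_neg_one]
  by_cases hdl : o ∈ l.dropLast
  · rw [if_pos hdl, index?_mem l o hmem]
    show PySem.List.slice l none (some ((l.idxOf o : Int) + 1)) = _
    rw [show ((l.idxOf o : Int) + 1) = ((l.idxOf o + 1 : Nat) : Int) by push_cast; ring,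
      PySem.List.slice_to_natCast]
  · rw [if_neg hdl]
    -- o occurs only at the last position, so the take keeps everything
    have hnot : ¬ l.idxOf o < l.length - 1 := fun hlt =>
      hdl ((List.mem_dropLast_iff_idxOf_lt hmem).mpr hlt)
    have hlen := List.idxOf_lt_length_of_mem hmem
    rw [List.take_of_length_le (by omega)]

-- ===== VERDICT (by name: the statement is the Claim_ definition above) =====
theorem deduplicate_as_path_spec : Claim_equal_deduplicate_as_path := by
  intro aspath _ hpre
  unfold Spec_deduplicate_as_path deduplicate_as_path deduplicate_as_path_alt
  rw [PySem.List.pyGet?_neg_one]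
  rcases h : aspath.getLast? with _ | o
  · exact absurd (List.getLast?_eq_none_iff.mp h) hpre
  · have hmem : o ∈ aspath := List.mem_of_getLast? h
    simp only []
    rw [show ∀ x : List Int,
        (x.foldl (fun (st : PySem.Set Int × List Int) asn =>
          if PySem.Set.contains st.1 asn then st
          else (PySem.Set.add st.1 asn, st.2 ++ [asn])) (PySem.Set.empty, [])).2
        = aFold PySem.Set.empty [] x from fun _ => rfl,
      trunc_eq aspath o h,
      core aspath o PySem.Set.empty [] hmem (by simp [PySem.Set.empty])]
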